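-- pv_equiv track=rewrite | github.com/SantinoVicentini/LearningPython-utdt-exercises | Guias/ejercicios.py | suma_en_pos_impares
-- ===== SOURCE A (Python) =====
-- from typing import List
--
-- def suma_en_pos_impares(l:List[int], n:int) -> List[int]:
--     vr:List[int] = []
--     i:int = 0
--     while i < len(l):
--
--         if i % 2 == 1:
--
--             vr.append(l[i]+n)
--         else:
--
--
--             vr.append(l[i])
--         i += 1
--     return vr
-- ===== SOURCE B (Python) =====
-- from typing import List
--
-- def suma_en_pos_impares(l: List[int], n: int) -> List[int]:
--     vr: List[int] = list(l)
--     vr[1::2] = [x + n for x in l[1::2]]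
--     return vr
-- ===== Notes on version B (the rewrite author's own statement) =====
-- stated objective: simpler
-- what changed: Replaces the index-by-index while loop with a per-index modulo branch by a bulk copy plus one strided slice assignment over only the odd positions.
import Mathlib
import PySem

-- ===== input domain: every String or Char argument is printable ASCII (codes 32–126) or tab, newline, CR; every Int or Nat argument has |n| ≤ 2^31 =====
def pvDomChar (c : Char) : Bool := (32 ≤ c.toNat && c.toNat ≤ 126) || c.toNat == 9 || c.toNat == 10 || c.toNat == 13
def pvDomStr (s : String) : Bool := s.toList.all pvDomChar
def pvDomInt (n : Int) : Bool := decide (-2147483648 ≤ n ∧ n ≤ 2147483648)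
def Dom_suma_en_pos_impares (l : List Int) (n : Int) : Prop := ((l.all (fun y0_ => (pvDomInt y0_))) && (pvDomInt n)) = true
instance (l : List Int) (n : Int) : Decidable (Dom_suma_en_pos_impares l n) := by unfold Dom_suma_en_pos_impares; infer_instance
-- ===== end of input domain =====

-- B replaces A's index loop with modulo branch by a bulk copy plus one strided
-- slice assignment over the odd positions (objective: simpler). A never mutates l.

-- ===== PORT A =====
-- while i < len(l): branch on i % 2, append, i += 1.  (l[i] is always in range here,
-- since 0 ≤ i < len l is guaranteed by the loop guard, so the plain getElem is exact.)
def sumaLoopA (l : List Int) (n : Int) (i : Nat) (vr : List Int) : List Int :=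
  if h : i < l.length then
    if i % 2 == 1 then sumaLoopA l n (i + 1) (vr ++ [l[i] + n])
    else sumaLoopA l n (i + 1) (vr ++ [l[i]])
  else vr
termination_by l.length - i

def suma_en_pos_impares (l : List Int) (n : Int) : List Int :=
  sumaLoopA l n 0 []

-- ===== PORT B =====
-- l[1::2]: hand port of the stride-2 slice starting at 1 (exact for this start/step).
def oddSlice : List Int → List Int
  | [] => []
  | [_] => []
  | _ :: b :: rest => b :: oddSlice rest

-- vr[1::2] = ys: hand port of the strided slice assignment (exact when
-- ys has exactly as many elements as there are odd positions, which B guarantees).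
def setOdds : List Int → List Int → List Int
  | [], _ => []
  | [a], _ => [a]
  | a :: b :: rest, [] => a :: b :: rest
  | a :: _ :: rest, o :: os => a :: o :: setOdds rest os

def suma_en_pos_impares_alt (l : List Int) (n : Int) : List Int :=
  setOdds l ((oddSlice l).map (fun x => x + n))

-- ===== PRECONDITION & SPEC =====
def Spec_suma_en_pos_impares (l : List Int) (n : Int) (out : List Int) : Prop := out = suma_en_pos_impares_alt l n
instance (l : List Int) (n : Int) (out : List Int) : Decidable (Spec_suma_en_pos_impares l n out) := by unfold Spec_suma_en_pos_impares; infer_instance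

-- ===== CLAIM (what is proved, stated in full; the proofs are below) =====
def Claim_equal_suma_en_pos_impares : Prop := ∀ (l : List Int) (n : Int), Dom_suma_en_pos_impares l n → Spec_suma_en_pos_impares l n (suma_en_pos_impares l n)

-- ===== LEMMAS AND PROOFS =====

-- characterisation of A's loop: what it appends from index i on, tracked by parity bit
def mixB (n : Int) : Bool → List Int → List Int
  | _, [] => []
  | b, x :: xs => (if b then x + n else x) :: mixB n (!b) xs

lemma parity_succ (i : Nat) : ((i + 1) % 2 == 1) = !(i % 2 == 1) := by
  rcases Nat.mod_two_eq_zero_or_one i with h | h <;> simp [Nat.add_mod, h]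

lemma loop_eq (l : List Int) (n : Int) :
    ∀ i vr, sumaLoopA l n i vr = vr ++ mixB n (i % 2 == 1) (l.drop i) := by
  intro i vr
  fun_induction sumaLoopA l n i vr with
  | case1 i vr h hodd ih =>
    have hd : l.drop i = l[i] :: l.drop (i + 1) := List.drop_eq_getElem_cons h
    rw [ih, hd, parity_succ, hodd]
    simp [mixB]
  | case2 i vr h hodd ih =>
    have hd : l.drop i = l[i] :: l.drop (i + 1) := List.drop_eq_getElem_cons h
    have hodd' : (i % 2 == 1) = false := by simpa using hodd
    rw [ih, hd, parity_succ, hodd']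
    simp [mixB]
  | case3 i vr h =>
    simp [mixB, List.drop_of_length_le (Nat.le_of_not_lt h)]

lemma mix_eq (n : Int) : ∀ xs : List Int,
    mixB n false xs = setOdds xs ((oddSlice xs).map (fun x => x + n)) := by
  intro xs
  induction xs using oddSlice.induct with
  | case1 => simp [mixB, setOdds]
  | case2 a => simp [mixB, setOdds]
  | case3 a b rest ih => simp [mixB, oddSlice, setOdds, ih]

-- ===== VERDICT (by name: the statement is the Claim_ definition above) =====
theorem suma_en_pos_impares_spec : Claim_equal_suma_en_pos_impares := by
  intro l n _
  unfold Spec_suma_en_pos_impares suma_en_pos_impares suma_en_pos_impares_alt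
  rw [loop_eq l n 0 []]
  simpa using mix_eq n l
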